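-- pv_equiv track=rewrite | github.com/makerportal/word_cloud | wiki_crawl.py | html_crawl
-- ===== SOURCE A (Python) =====
-- def html_crawl(key1,content):
--
--     wiki_indx = [i+len(key1) for i, j in enumerate(content) if content[i:i+len(key1)] == key1]
--
--     wiki_titles = []
--     end_key = '">'
--     for ii,indx in enumerate(wiki_indx):
--         for mm in range(0,200):
--             if content[indx+mm:indx+mm+len(end_key)]==end_key:
--                 wiki_titles.append(content[indx:indx+mm])
--                 break
--
--     return wiki_titles
-- ===== SOURCE B (Python) =====
-- def html_crawl(key1, content):
--     # Different algorithm: index the positions of the end marker '">' ONCE,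
--     # then a single forward pass over the text consumes that index with a
--     # two-pointer merge -- no per-occurrence window scan.
--     k = len(key1)
--     n = len(content)
--     ends = [j for j in range(n - 1) if content[j] == '"' and content[j + 1] == '>']
--     m = len(ends)
--     titles = []
--     p = 0
--     for i in range(n):
--         if content[i:i + k] == key1:
--             indx = i + k
--             while p < m and ends[p] < indx:
--                 p += 1
--             if p < m and ends[p] <= indx + 199:
--                 titles.append(content[indx:ends[p]])
--     return titles
-- ===== Notes on version B (the rewrite author's own statement) =====
-- stated objective: alternative
-- what changed: A collects every key occurrence and then runs a bounded 200-step lookahead scan per occurrence; B instead indexes all positions of the end marker '"' '>' once and consumes that index with an integer two-pointer merge during a single forward pass, so the per-occurrence window scan disappears.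
import Mathlib
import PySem

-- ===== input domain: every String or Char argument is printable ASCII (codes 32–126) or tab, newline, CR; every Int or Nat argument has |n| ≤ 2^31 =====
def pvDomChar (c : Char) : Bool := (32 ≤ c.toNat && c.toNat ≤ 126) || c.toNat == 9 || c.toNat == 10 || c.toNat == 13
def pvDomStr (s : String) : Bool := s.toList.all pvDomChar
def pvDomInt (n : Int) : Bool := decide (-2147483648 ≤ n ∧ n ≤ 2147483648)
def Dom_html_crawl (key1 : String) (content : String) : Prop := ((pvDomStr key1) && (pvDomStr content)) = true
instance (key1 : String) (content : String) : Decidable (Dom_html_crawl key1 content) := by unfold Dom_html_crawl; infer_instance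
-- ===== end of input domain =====

-- B replaces A's per-key-occurrence bounded 200-step lookahead scan by a one-time index of
-- all end-marker ('">') positions consumed with a two-pointer merge during a single forward
-- pass (objective: alternative — a different algorithm of similar cost).

-- ===== PORT A =====
def pvEndKey : List Char := ['"', '>']

-- inner 'for mm in range(0,200): … break' of A: first mm whose 2-char slice equals '">'
def pvInnerA (c : List Char) (indx : Int) : List Int → Option (List Char)
  | [] => none
  | mm :: rest =>
    if PySem.List.slice c (some (indx + mm)) (some (indx + mm + (pvEndKey.length : Int))) = pvEndKey then
      some (PySem.List.slice c (some indx) (some (indx + mm)))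
    else pvInnerA c indx rest

def html_crawl (key1 : String) (content : String) : List String :=
  let key := key1.toList
  let c := content.toList
  let wiki_indx : List Int :=
    ((PySem.List.enumerate c 0).filter
        (fun p => PySem.List.slice c (some p.1) (some (p.1 + (key.length : Int))) == key)).map
      (fun p => p.1 + (key.length : Int))
  let wiki_titles : List (List Char) :=
    wiki_indx.foldl
      (fun acc indx =>
        match pvInnerA c indx (PySem.List.pyRange 0 200 1) with
        | some t => acc ++ [t]
        | none => acc) []
  wiki_titles.map String.ofList

-- ===== PORT B =====
-- B's 'ends' comprehension: every j with content[j] == '"' and content[j+1] == '>'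
def pvE (c : List Char) : List Int :=
  (PySem.List.pyRange 0 ((c.length : Int) - 1) 1).filter
    (fun j => PySem.List.pyGet? c j == some '"' && PySem.List.pyGet? c (j + 1) == some '>')

-- B's 'while p < m and ends[p] < indx: p += 1' (the two-pointer advance)
def pvAdv (ends : List Int) (indx : Int) (p : Nat) : Nat :=
  if h : p < ends.length then
    if ends[p] < indx then pvAdv ends indx (p + 1) else p
  else p
termination_by ends.length - p

-- B's loop body for one position i
def pvStep (key c : List Char) (ends : List Int) (st : Nat × List (List Char)) (i : Int) :
    Nat × List (List Char) :=
  if PySem.List.slice c (some i) (some (i + (key.length : Int))) = key then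
    let indx := i + (key.length : Int)
    let p := pvAdv ends indx st.1
    if h : p < ends.length then
      if ends[p] ≤ indx + 199 then
        (p, st.2 ++ [PySem.List.slice c (some indx) (some ends[p])])
      else (p, st.2)
    else (p, st.2)
  else st

def html_crawl_alt (key1 : String) (content : String) : List String :=
  let key := key1.toList
  let c := content.toList
  ((PySem.List.pyRange 0 (c.length : Int) 1).foldl (pvStep key c (pvE c)) (0, [])).2.map
    String.ofList

-- ===== PRECONDITION & SPEC =====
def Spec_html_crawl (key1 : String) (content : String) (out : List String) : Prop := out = html_crawl_alt key1 content
instance (key1 : String) (content : String) (out : List String) : Decidable (Spec_html_crawl key1 content out) := by unfold Spec_html_crawl; infer_instance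

-- ===== CLAIM (what is proved, stated in full; the proofs are below) =====
def Claim_equal_html_crawl : Prop := ∀ (key1 : String) (content : String), Dom_html_crawl key1 content → Spec_html_crawl key1 content (html_crawl key1 content)

-- ===== LEMMAS AND PROOFS =====

-- A's output in normal form: filter the key positions out of range(len), filterMap the inner scan
def pvAform (key c : List Char) (start : Int) : List (List Char) :=
  ((PySem.List.pyRange start (c.length : Int) 1).filter
      (fun j => PySem.List.slice c (some j) (some (j + (key.length : Int))) == key)).filterMap
    (fun j => pvInnerA c (j + (key.length : Int)) (PySem.List.pyRange 0 200 1))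

theorem pv_slice_eq_iff_prefix (c key : List Char) (p : Nat) :
    PySem.List.slice c (some (p : Int)) (some ((p : Int) + (key.length : Int))) = key ↔ key <+: c.drop p := by
  rw [PySem.List.slice_natCast_add, List.prefix_iff_eq_take]
  exact eq_comm

theorem pv_innerA_none (c : List Char) (indx : Nat) :
    ∀ (d a : Nat), a + d = 200 →
      (∀ mm : Nat, a ≤ mm → mm < 200 → ¬ pvEndKey <+: c.drop (indx + mm)) →
      pvInnerA c (indx : Int) (PySem.List.pyRange (a : Int) 200 1) = none := by
  intro d
  induction d with
  | zero =>
    intro a ha _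
    rw [PySem.List.pyRange_one_eq_nil (by omega)]
    rfl
  | succ n ih =>
    intro a ha hall
    rw [PySem.List.pyRange_one_cons (by omega : (a:Int) < 200)]
    show (if _ = _ then _ else _) = _
    rw [if_neg, show ((a:Int) + 1) = ((a+1 : Nat) : Int) by push_cast; ring]
    · exact ih (a+1) (by omega) (fun mm h1 h2 => hall mm (by omega) h2)
    · have := hall a le_rfl (by omega)
      rw [show (indx:Int) + (a:Int) = ((indx + a : Nat):Int) by push_cast; ring]
      intro hc
      exact this ((pv_slice_eq_iff_prefix c pvEndKey (indx + a)).mp (by simpa using hc))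

theorem pv_innerA_first (c : List Char) (indx : Nat) :
    ∀ (d a mm0 : Nat), a + d = 200 → a ≤ mm0 → mm0 < 200 →
      pvEndKey <+: c.drop (indx + mm0) →
      (∀ m : Nat, a ≤ m → m < mm0 → ¬ pvEndKey <+: c.drop (indx + m)) →
      pvInnerA c (indx : Int) (PySem.List.pyRange (a : Int) 200 1)
        = some (PySem.List.slice c (some (indx : Int)) (some ((indx : Int) + (mm0 : Int)))) := by
  intro d
  induction d with
  | zero => intro a mm0 ha h1 h2 _ _; omega
  | succ n ih =>
    intro a mm0 ha hle hlt hpre hmin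
    rw [PySem.List.pyRange_one_cons (by omega : (a:Int) < 200)]
    show (if _ = _ then _ else _) = _
    rcases Nat.eq_or_lt_of_le hle with heq | hlt2
    · subst heq
      rw [if_pos]
      rw [show (indx:Int) + (a:Int) = ((indx + a : Nat):Int) by push_cast; ring]
      exact (by simpa using (pv_slice_eq_iff_prefix c pvEndKey (indx + a)).mpr hpre)
    · rw [if_neg, show ((a:Int) + 1) = ((a+1 : Nat) : Int) by push_cast; ring]
      · exact ih (a+1) mm0 (by omega) (by omega) hlt hpre (fun m h1 h2 => hmin m (by omega) h2)
      · have := hmin a le_rfl hlt2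
        rw [show (indx:Int) + (a:Int) = ((indx + a : Nat):Int) by push_cast; ring]
        intro hc
        exact this ((pv_slice_eq_iff_prefix c pvEndKey (indx + a)).mp (by simpa using hc))

theorem pv_filterMap_cons_toList {α β : Type} (f : α → Option β) (a : α) (l : List α) :
    List.filterMap f (a :: l) = (f a).toList ++ List.filterMap f l := by
  cases h : f a <;> simp [h]

theorem pv_foldl_filterMap (c : List Char) (l : List Int) (acc : List (List Char)) :
    l.foldl (fun acc indx =>
        match pvInnerA c indx (PySem.List.pyRange 0 200 1) with
        | some t => acc ++ [t]
        | none => acc) acc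
      = acc ++ l.filterMap (fun indx => pvInnerA c indx (PySem.List.pyRange 0 200 1)) := by
  induction l generalizing acc with
  | nil => simp
  | cons x xs ih =>
    simp only [List.foldl_cons, List.filterMap_cons]
    cases h : pvInnerA c x (PySem.List.pyRange 0 200 1) <;> simp [ih]

theorem pv_A_norm (key1 content : String) :
    html_crawl key1 content = (pvAform key1.toList content.toList 0).map String.ofList := by
  unfold html_crawl pvAform
  simp only [PySem.List.enumerate_eq_map_pyRange content.toList 'a',
    List.filter_map, List.map_map,
    List.map_map]
  simp only [Function.comp_def, PySem.List.len]
  rw [pv_foldl_filterMap content.toList,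
    List.nil_append, List.filterMap_map]
  rfl

-- ---- B-side lemmas ----

-- proof-only view of the pointer: the not-yet-consumed suffix of the end index
def pvEndsDrop (indx : Int) : List Int → List Int
  | [] => []
  | e :: rest => if e < indx then pvEndsDrop indx rest else e :: rest

theorem pv_prefix2 (l : List Char) :
    pvEndKey <+: l ↔ l[0]? = some '"' ∧ l[1]? = some '>' := by
  match l with
  | [] => simp [pvEndKey]
  | [a] => simp [pvEndKey, List.cons_prefix_cons]
  | a :: b :: rest => simp [pvEndKey, List.cons_prefix_cons, eq_comm]

theorem pv_memE (c : List Char) (x : Int) :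
    x ∈ pvE c ↔ ∃ j : Nat, x = (j : Int) ∧ pvEndKey <+: c.drop j := by
  unfold pvE
  rw [List.mem_filter, PySem.List.mem_pyRange_one]
  constructor
  · rintro ⟨⟨h0, h1⟩, hb⟩
    refine ⟨x.toNat, by omega, ?_⟩
    rw [pv_prefix2]
    simp only [Bool.and_eq_true, beq_iff_eq] at hb
    rw [PySem.List.pyGet?_of_nonneg _ h0] at hb
    rw [PySem.List.pyGet?_of_nonneg _ (by omega)] at hb
    constructor
    · rw [List.getElem?_drop]; simpa using hb.1
    · rw [List.getElem?_drop]
      rw [show (x + 1).toNat = x.toNat + 1 by omega] at hb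
      simpa using hb.2
  · rintro ⟨j, rfl, hp⟩
    rw [pv_prefix2] at hp
    obtain ⟨h0, h1⟩ := hp
    rw [List.getElem?_drop] at h0 h1
    have hj1 : j + 1 < c.length := by
      rcases List.getElem?_eq_some_iff.mp h1 with ⟨hl, _⟩
      omega
    refine ⟨⟨by positivity, by omega⟩, ?_⟩
    simp only [Bool.and_eq_true, beq_iff_eq]
    constructor
    · rw [PySem.List.pyGet?_natCast]; simpa using h0
    · rw [show ((j:Int) + 1) = ((j+1 : Nat) : Int) by push_cast; ring, PySem.List.pyGet?_natCast]
      simpa using h1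

theorem pv_pairwiseE (c : List Char) : (pvE c).Pairwise (· < ·) :=
  (PySem.List.pairwise_lt_pyRange_one 0 ((c.length : Int) - 1)).filter _

theorem pv_E_nonneg (c : List Char) : ∀ x ∈ pvE c, 0 ≤ x := by
  intro x hx
  rcases (pv_memE c x).mp hx with ⟨j, rfl, _⟩
  positivity

theorem pv_dropLt_nonneg (l : List Int) (h : ∀ x ∈ l, 0 ≤ x) : pvEndsDrop 0 l = l := by
  cases l with
  | nil => rfl
  | cons a rest =>
    unfold pvEndsDrop
    rw [if_neg]
    have := h a (by simp)
    omega

theorem pv_dropLt_comp (t1 t2 : Int) (h : t1 ≤ t2) :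
    ∀ l : List Int, pvEndsDrop t2 (pvEndsDrop t1 l) = pvEndsDrop t2 l := by
  intro l
  induction l with
  | nil => rfl
  | cons a rest ih =>
    by_cases ha : a < t1
    · have ha2 : a < t2 := by omega
      simp only [pvEndsDrop, if_pos ha, if_pos ha2, ih]
    · simp only [pvEndsDrop, if_neg ha]

theorem pv_dropLt_spec (t : Int) (l : List Int) (hs : l.Pairwise (· < ·)) :
    (pvEndsDrop t l = [] → ∀ x ∈ l, x < t) ∧
    (∀ e rest, pvEndsDrop t l = e :: rest → e ∈ l ∧ t ≤ e ∧ ∀ x ∈ l, t ≤ x → e ≤ x) := by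
  induction l with
  | nil => exact ⟨fun _ x hx => absurd hx (by simp), fun e rest h => by simp [pvEndsDrop] at h⟩
  | cons a restl ih =>
    rw [List.pairwise_cons] at hs
    obtain ⟨hlt, hrest⟩ := hs
    obtain ⟨ih1, ih2⟩ := ih hrest
    by_cases ha : a < t
    · simp only [pvEndsDrop, if_pos ha]
      constructor
      · intro hn x hx
        rcases List.mem_cons.mp hx with rfl | hx'
        · exact ha
        · exact ih1 hn x hx'
      · intro e rest h
        obtain ⟨he, hte, hmin⟩ := ih2 e rest h
        refine ⟨List.mem_cons_of_mem _ he, hte, ?_⟩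
        intro x hx htx
        rcases List.mem_cons.mp hx with rfl | hx'
        · omega
        · exact hmin x hx' htx
    · simp only [pvEndsDrop, if_neg ha]
      constructor
      · intro h; simp at h
      · intro e rest h
        injection h with h1 h2
        subst h1
        refine ⟨List.mem_cons_self, by omega, ?_⟩
        intro x hx _
        rcases List.mem_cons.mp hx with rfl | hx'
        · exact le_rfl
        · exact le_of_lt (hlt x hx')

-- the pointer advance is exactly pvEndsDrop on the remaining suffix
theorem pv_adv_drop (ends : List Int) (indx : Int) :
    ∀ p : Nat, List.drop (pvAdv ends indx p) ends = pvEndsDrop indx (List.drop p ends) := by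
  intro p
  induction hd : ends.length - p using Nat.strong_induction_on generalizing p with
  | _ d ih =>
    unfold pvAdv
    by_cases h : p < ends.length
    · rw [dif_pos h]
      rw [List.drop_eq_getElem_cons h]
      by_cases hlt : ends[p] < indx
      · rw [if_pos hlt]
        rw [ih (ends.length - (p + 1)) (by omega) (p + 1) rfl]
        simp [pvEndsDrop, hlt]
      · rw [if_neg hlt]
        rw [List.drop_eq_getElem_cons h]
        simp [pvEndsDrop, hlt]
    · rw [dif_neg h]
      rw [List.drop_eq_nil_of_le (by omega : ends.length ≤ p)]
      rfl

-- the head of the consumed index, filtered to ≥ indx, computes A's inner 200-step scan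
theorem pv_lookup_eq (c : List Char) (indx : Nat) :
    (match pvEndsDrop (indx : Int) (pvE c) with
     | [] => none
     | e :: _ =>
       if e ≤ (indx : Int) + 199 then some (PySem.List.slice c (some (indx : Int)) (some e))
       else none)
      = pvInnerA c (indx : Int) (PySem.List.pyRange 0 200 1) := by
  obtain ⟨spec1, spec2⟩ := pv_dropLt_spec (indx : Int) (pvE c) (pv_pairwiseE c)
  cases h : pvEndsDrop (indx : Int) (pvE c) with
  | nil =>
    have hall := spec1 h
    rw [show ((0:Int)) = ((0:Nat):Int) by norm_cast]
    rw [pv_innerA_none c indx 200 0 rfl ?_]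
    intro mm _ hmm hpre
    have hx : ((indx + mm : Nat) : Int) ∈ pvE c := (pv_memE c _).mpr ⟨indx + mm, rfl, hpre⟩
    have := hall _ hx
    omega
  | cons e rest =>
    obtain ⟨hmem, hge, hmin⟩ := spec2 e rest h
    rcases (pv_memE c e).mp hmem with ⟨eN, rfl, hpre⟩
    have hgeN : indx ≤ eN := by exact_mod_cast hge
    show (if (eN : Int) ≤ (indx : Int) + 199
            then some (PySem.List.slice c (some (indx : Int)) (some (eN : Int))) else none)
          = pvInnerA c (indx : Int) (PySem.List.pyRange 0 200 1)
    by_cases hle : (eN : Int) ≤ (indx : Int) + 199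
    · rw [if_pos hle]
      have hmm0 : eN - indx < 200 := by omega
      have hpre' : pvEndKey <+: c.drop (indx + (eN - indx)) := by
        rw [show indx + (eN - indx) = eN by omega]; exact hpre
      have hmin' : ∀ m : Nat, 0 ≤ m → m < eN - indx → ¬ pvEndKey <+: c.drop (indx + m) := by
        intro m _ hm hp
        have hx : ((indx + m : Nat) : Int) ∈ pvE c := (pv_memE c _).mpr ⟨indx + m, rfl, hp⟩
        have := hmin _ hx (by exact_mod_cast Nat.le_add_right indx m)
        omega
      rw [show ((0:Int)) = ((0:Nat):Int) by norm_cast]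
      rw [pv_innerA_first c indx 200 0 (eN - indx) rfl (Nat.zero_le _) hmm0 hpre' hmin']
      rw [show ((indx:Int) + ((eN - indx : Nat) : Int)) = (eN : Int) by omega]
    · rw [if_neg hle]
      rw [show ((0:Int)) = ((0:Nat):Int) by norm_cast]
      rw [pv_innerA_none c indx 200 0 rfl ?_]
      intro mm _ hmm hp
      have hx : ((indx + mm : Nat) : Int) ∈ pvE c := (pv_memE c _).mpr ⟨indx + mm, rfl, hp⟩
      have := hmin _ hx (by exact_mod_cast Nat.le_add_right indx mm)
      omega

theorem pv_step_eq (key c : List Char) (a : Nat) (t : Int) (p : Nat) (acc : List (List Char))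
    (ht : t ≤ (a : Int) + (key.length : Int))
    (hp : List.drop p (pvE c) = pvEndsDrop t (pvE c)) :
    pvStep key c (pvE c) (p, acc) (a : Int)
      = if PySem.List.slice c (some (a : Int)) (some ((a : Int) + (key.length : Int))) = key
        then (pvAdv (pvE c) ((a : Int) + (key.length : Int)) p,
              acc ++ (pvInnerA c (((a + key.length : Nat)) : Int)
                        (PySem.List.pyRange 0 200 1)).toList)
        else (p, acc) := by
  unfold pvStep
  split_ifs with hm
  · simp only []
    set p' := pvAdv (pvE c) ((a : Int) + (key.length : Int)) p with hp'
    have hdrop : List.drop p' (pvE c) = pvEndsDrop ((a : Int) + (key.length : Int)) (pvE c) := by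
      rw [hp', pv_adv_drop, hp, pv_dropLt_comp t _ ht]
    have hcast : ((a : Int) + (key.length : Int)) = ((a + key.length : Nat) : Int) := by
      push_cast; ring
    rw [← pv_lookup_eq c (a + key.length), ← hcast, ← hdrop]
    cases hcase : List.drop p' (pvE c) with
    | nil =>
      have hlen : (pvE c).length ≤ p' := by
        by_contra hcon
        have := List.drop_eq_getElem_cons (l := pvE c) (by omega : p' < (pvE c).length)
        rw [hcase] at this
        exact List.cons_ne_nil _ _ this.symm
      rw [dif_neg (by omega)]
      simp
    | cons e rest =>
      have hlt : p' < (pvE c).length := by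
        by_contra hcon
        rw [List.drop_eq_nil_of_le (by omega)] at hcase
        exact List.cons_ne_nil _ _ hcase.symm
      have hget : (pvE c)[p'] = e := by
        have h0 : (pvE c)[p']? = some e := by
          have hh : (List.drop p' (pvE c))[0]? = (pvE c)[p' + 0]? := List.getElem?_drop
          rw [hcase] at hh
          simpa using hh.symm
        rw [List.getElem?_eq_getElem hlt] at h0
        exact Option.some.inj h0
      rw [dif_pos hlt, hget]
      by_cases hle : e ≤ (a : Int) + (key.length : Int) + 199 <;> simp [hle]
  · rfl

theorem pv_B_loop (key c : List Char) :
    ∀ (d a : Nat), a + d = c.length → ∀ (t : Int) (p : Nat) (acc : List (List Char)),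
      t ≤ (a : Int) + (key.length : Int) →
      List.drop p (pvE c) = pvEndsDrop t (pvE c) →
      ((PySem.List.pyRange (a : Int) (c.length : Int) 1).foldl (pvStep key c (pvE c))
          (p, acc)).2
        = acc ++ pvAform key c (a : Int) := by
  intro d
  induction d with
  | zero =>
    intro a ha t p acc ht hp
    have : a = c.length := by omega
    subst this
    unfold pvAform
    rw [PySem.List.pyRange_one_eq_nil le_rfl]
    simp
  | succ n ih =>
    intro a ha t p acc ht hp
    have hab : (a : Int) < (c.length : Int) := by exact_mod_cast Nat.lt_of_lt_of_le (by omega) le_rfl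
    rw [PySem.List.pyRange_one_cons hab, List.foldl_cons,
      pv_step_eq key c a t p acc ht hp]
    unfold pvAform
    rw [PySem.List.pyRange_one_cons hab, List.filter_cons]
    by_cases hm : PySem.List.slice c (some (a : Int)) (some ((a : Int) + (key.length : Int))) = key
    · rw [if_pos hm]
      have hb : (PySem.List.slice c (some (a : Int)) (some ((a : Int) + (key.length : Int))) == key) = true := by
        simpa using hm
      simp only [hb, if_true]
      rw [pv_filterMap_cons_toList]
      rw [show ((a : Int) + 1) = ((a + 1 : Nat) : Int) by push_cast; ring]
      rw [ih (a + 1) (by omega) ((a : Int) + (key.length : Int)) _ _ (by push_cast; omega)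
        (by rw [pv_adv_drop, hp, pv_dropLt_comp t _ ht])]
      rw [show ((a : Int) + (key.length : Int)) = ((a + key.length : Nat) : Int) by push_cast; ring]
      unfold pvAform
      rw [List.append_assoc]
    · rw [if_neg hm]
      have hb : (PySem.List.slice c (some (a : Int)) (some ((a : Int) + (key.length : Int))) == key) = false := by
        simpa using hm
      simp only [hb, Bool.false_eq_true, if_false]
      rw [show ((a : Int) + 1) = ((a + 1 : Nat) : Int) by push_cast; ring]
      rw [ih (a + 1) (by omega) t _ _ (by push_cast; omega) hp]
      unfold pvAform
      rfl

theorem pv_B_norm (key1 content : String) :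
    html_crawl_alt key1 content = (pvAform key1.toList content.toList 0).map String.ofList := by
  show (((PySem.List.pyRange 0 (content.toList.length : Int) 1).foldl
      (pvStep key1.toList content.toList (pvE content.toList)) (0, [])).2).map String.ofList
    = (pvAform key1.toList content.toList 0).map String.ofList
  rw [show ((0:Int)) = ((0:Nat):Int) by norm_cast]
  rw [pv_B_loop key1.toList content.toList content.toList.length 0 (by omega)
    ((0 : Nat) : Int) 0 [] (by positivity)
    (by rw [List.drop_zero, Nat.cast_zero, pv_dropLt_nonneg (pvE content.toList) (pv_E_nonneg content.toList)])]
  simp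

-- ===== VERDICT (by name: the statement is the Claim_ definition above) =====
theorem html_crawl_spec : Claim_equal_html_crawl := by
  intro key1 content _
  unfold Spec_html_crawl
  rw [pv_A_norm, pv_B_norm]
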